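-- pv_equiv track=rewrite | github.com/nishadmusthafa/talkdeskintegrator | integrator/helper.py | translate_special_syntax
-- ===== SOURCE A (Python) =====
-- def translate_special_syntax(target_string, context):
--     # For this implementation(talkdesk challenge), I'm assuming a basic parser of the %% syntax.
--     # Eg: "escape sequences" are not being implemented currently.
--     # So if you use % within a variable, this function would fail. This is a TODO
--     # if target_string = "the%sample%budapest%sample2%"
--     # and context = {'sample': grand, '*', 'hotel'}
--     # the return value is "thegrandbudapesthotel"
--     # * is like a 'default' fallback. If there is no
--     # replacement found, then the string is not translated and
--     # returned as is.
--     variable_found = False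
--     output = ""
--     variable = ""
--
--     for char in target_string:
--         if not char == "%":
--             if variable_found:
--                 variable += char
--             else:
--                 output += char
--         else:
--             variable += char
--             if variable_found:
--                 if variable[1:-1] in context:
--                     translated_string = context[variable[1:-1]]
--                 elif '*' in context:
--                     translated_string = context['*']
--                 else:
--                     translated_string = variable
--                 output += translated_string
--                 variable = ""
--             variable_found = not variable_found
--
--     return output
-- ===== SOURCE B (Python) =====
-- def translate_special_syntax(target_string, context):
--     # Split once on '%': even chunks are literal text, odd chunks are variable
--     # names; an odd chunk in last position is an unclosed variable and is dropped.
--     parts = target_string.split('%')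
--     last = len(parts) - 1
--     pieces = []
--     for i, part in enumerate(parts):
--         if i % 2 == 0:
--             pieces.append(part)
--         elif i < last:
--             if part in context:
--                 pieces.append(context[part])
--             elif '*' in context:
--                 pieces.append(context['*'])
--             else:
--                 pieces.append('%' + part + '%')
--     return ''.join(pieces)
-- ===== Notes on version B (the rewrite author's own statement) =====
-- stated objective: faster
-- what changed: Replaces A's character-by-character state machine (variable_found flag, char-wise string concatenation) by one split('%') followed by a single pass over the enumerated chunks: even chunks are literals, odd non-final chunks are variable names to translate, a final odd chunk is an unclosed variable and is dropped; pieces are collected in a list and joined once, avoiding repeated string += .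
import Mathlib
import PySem

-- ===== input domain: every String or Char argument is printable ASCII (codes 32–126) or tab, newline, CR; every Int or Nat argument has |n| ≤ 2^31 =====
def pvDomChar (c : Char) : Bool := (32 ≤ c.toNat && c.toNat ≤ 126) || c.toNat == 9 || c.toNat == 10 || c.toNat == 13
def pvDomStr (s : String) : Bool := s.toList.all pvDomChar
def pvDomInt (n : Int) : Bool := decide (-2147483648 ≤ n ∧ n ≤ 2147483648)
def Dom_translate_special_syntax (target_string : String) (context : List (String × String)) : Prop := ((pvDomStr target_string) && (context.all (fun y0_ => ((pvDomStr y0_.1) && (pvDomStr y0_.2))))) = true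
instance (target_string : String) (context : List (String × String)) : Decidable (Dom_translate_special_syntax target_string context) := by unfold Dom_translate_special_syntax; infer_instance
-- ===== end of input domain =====

-- B replaces A's per-character state machine by a single split('%') plus one pass over the
-- numbered chunks (objective: idiomatic / simpler); equivalence proved on all inputs.

-- ===== PORT A =====
-- loop body of A's character state machine; state = (variable_found, output, variable)
def stepA (context : List (String × String)) (st : Bool × List Char × List Char)
    (c : Char) : Bool × List Char × List Char :=
  if !(c == '%') then
    (if st.1 then (st.1, st.2.1, st.2.2 ++ [c]) else (st.1, st.2.1 ++ [c], st.2.2))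
  else
    let var := st.2.2 ++ [c]
    if st.1 then
      let translated : String :=
        if PySem.Dict.contains (PySem.Dict.mk context) (String.ofList (PySem.List.slice var (some 1) (some (-1)))) then
          (PySem.Dict.get? (PySem.Dict.mk context) (String.ofList (PySem.List.slice var (some 1) (some (-1))))).getD ""
        else if PySem.Dict.contains (PySem.Dict.mk context) "*" then
          (PySem.Dict.get? (PySem.Dict.mk context) "*").getD ""
        else String.ofList var
      (!st.1, st.2.1 ++ translated.toList, ([] : List Char))
    else (!st.1, st.2.1, var)

def translate_special_syntax (target_string : String) (context : List (String × String)) : String :=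
  String.ofList ((target_string.toList.foldl (stepA context) (false, [], [])).2.1)

-- ===== PORT B =====
-- loop body of B's pass over the enumerated chunks of split('%')
def stepB (context : List (String × String)) (last : Int) (acc : List (List Char))
    (ip : Int × List Char) : List (List Char) :=
  if PySem.Int.mod ip.1 2 == 0 then acc ++ [ip.2]
  else if ip.1 < last then
    if PySem.Dict.contains (PySem.Dict.mk context) (String.ofList ip.2) then
      acc ++ [((PySem.Dict.get? (PySem.Dict.mk context) (String.ofList ip.2)).getD "").toList]
    else if PySem.Dict.contains (PySem.Dict.mk context) "*" then
      acc ++ [((PySem.Dict.get? (PySem.Dict.mk context) "*").getD "").toList]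
    else acc ++ [('%' :: ip.2) ++ ['%']]
  else acc

def translate_special_syntax_alt (target_string : String) (context : List (String × String)) : String :=
  let parts := PySem.Chars.splitOn target_string.toList ['%']
  let last : Int := (parts.length : Int) - 1
  let pieces := (PySem.List.enumerate parts).foldl (stepB context last) []
  String.ofList (PySem.Chars.join [] pieces)

-- ===== PRECONDITION & SPEC =====
def Spec_translate_special_syntax (target_string : String) (context : List (String × String)) (out : String) : Prop := out = translate_special_syntax_alt target_string context
instance (target_string : String) (context : List (String × String)) (out : String) : Decidable (Spec_translate_special_syntax target_string context out) := by unfold Spec_translate_special_syntax; infer_instance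

-- ===== CLAIM (what is proved, stated in full; the proofs are below) =====
def Claim_equal_translate_special_syntax : Prop := ∀ (target_string : String) (context : List (String × String)), Dom_translate_special_syntax target_string context → Spec_translate_special_syntax target_string context (translate_special_syntax target_string context)

-- ===== LEMMAS AND PROOFS =====

-- the translation of one closed variable name (shared reference for both proofs)
def trVar (context : List (String × String)) (name : List Char) : List Char :=
  if PySem.Dict.contains (PySem.Dict.mk context) (String.ofList name) then
    ((PySem.Dict.get? (PySem.Dict.mk context) (String.ofList name)).getD "").toList
  else if PySem.Dict.contains (PySem.Dict.mk context) "*" then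
    ((PySem.Dict.get? (PySem.Dict.mk context) "*").getD "").toList
  else '%' :: (name ++ ['%'])

-- reference model of str.split('%') with the reversed accumulator cur
def mySplit : List Char → List Char → List (List Char)
  | [], cur => [cur.reverse]
  | c :: t, cur => if c = '%' then cur.reverse :: mySplit t [] else mySplit t (c :: cur)

-- the pieces both programs emit, computed from the chunk list (literal-first)
def chunks (context : List (String × String)) : List (List Char) → List (List Char)
  | [] => []
  | [p] => [p]
  | [p, _] => [p]
  | p :: v :: rest => p :: trVar context v :: chunks context rest

-- same, starting at an (open) variable chunk
def chunksV (context : List (String × String)) : List (List Char) → List (List Char)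
  | [] => []
  | [_] => []
  | v :: rest => trVar context v :: chunks context rest

lemma mySplit_ne_nil (t cur : List Char) : mySplit t cur ≠ [] := by
  induction t generalizing cur with
  | nil => simp [mySplit]
  | cons c t ih =>
    simp only [mySplit]
    split
    · simp
    · exact ih _

lemma chunks_cons (context : List (String × String)) (p : List Char) (rest : List (List Char)) :
    chunks context (p :: rest) = p :: chunksV context rest := by
  match rest with
  | [] => simp [chunks, chunksV]
  | [v] => simp [chunks, chunksV]
  | v :: h :: tl => simp [chunks, chunksV]

lemma splitOn_go_eq (fuel : Nat) : ∀ (cs cur : List Char) (acc : List (List Char)),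
    cs.length < fuel →
    PySem.Chars.splitOn.go ['%'] fuel cs cur acc = acc.reverse ++ mySplit cs cur := by
  induction fuel with
  | zero => intro cs cur acc h; omega
  | succ n ih =>
    intro cs cur acc h
    rw [PySem.Chars.splitOn.go.eq_def]
    match cs with
    | [] => simp [mySplit]
    | c :: rest =>
      simp only []
      by_cases hc : c = '%'
      · subst hc
        have hpre : List.isPrefixOf ['%'] ('%' :: rest) = true := by
          simp [List.isPrefixOf]
        simp only [hpre, if_true, List.length_cons, List.drop_succ_cons, List.length_nil, List.drop_zero]
        rw [ih rest [] (List.reverse cur :: acc) (by simpa using Nat.lt_of_succ_lt_succ h)]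
        simp [mySplit]
      · have hpre : List.isPrefixOf ['%'] (c :: rest) = false := by
          simp [List.isPrefixOf]
          intro hcontr
          exact hc hcontr.symm
        simp only [hpre, Bool.false_eq_true, if_false]
        rw [ih rest (c :: cur) acc (by simpa using Nat.lt_of_succ_lt_succ h)]
        simp [mySplit, hc]

lemma splitOn_eq_mySplit (cs : List Char) :
    PySem.Chars.splitOn cs ['%'] = mySplit cs [] := by
  have := splitOn_go_eq (cs.length + 1) cs [] [] (by omega)
  simpa [PySem.Chars.splitOn] using this

-- the slice variable[1:-1] of '%' ++ name ++ '%' is name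
lemma slice_var (name : List Char) :
    PySem.List.slice ('%' :: (name ++ ['%'])) (some 1) (some (-1)) = name := by
  simp [PySem.List.slice, PySem.List.clampIdx]
  rw [if_neg (by omega)]
  simp

-- the first chunk of mySplit absorbs the pending accumulator
lemma mySplit_cur (t : List Char) : ∀ cur : List Char,
    mySplit t cur = (cur.reverse ++ (mySplit t []).headI) :: (mySplit t []).tail := by
  induction t with
  | nil => intro cur; simp [mySplit]
  | cons c t ih =>
    intro cur
    by_cases hc : c = '%'
    · subst hc; simp [mySplit]
    · simp only [mySplit, if_neg hc]
      rw [ih (c :: cur), ih [c]]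
      simp

-- A's state machine produces exactly the chunks of mySplit
lemma A_run (context : List (String × String)) (t : List Char) :
    (∀ out : List Char,
      ((t.foldl (stepA context) (false, out, [])).2.1
        = out ++ (chunks context (mySplit t [])).flatten))
    ∧ (∀ out cur : List Char,
      ((t.foldl (stepA context) (true, out, '%' :: cur.reverse)).2.1
        = out ++ (chunksV context (mySplit t cur)).flatten)) := by
  induction t with
  | nil =>
    constructor
    · intro out; simp [mySplit, chunks]
    · intro out cur; simp [mySplit, chunksV]
  | cons c t ih =>
    constructor
    · intro out
      by_cases hc : c = '%'
      · subst hc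
        have h1 : stepA context (false, out, []) '%' = (true, out, ['%']) := by
          simp [stepA]
        rw [List.foldl_cons, h1]
        have := ih.2 out []
        simp only [List.reverse_nil] at this
        rw [this]
        simp [mySplit, chunks_cons]
      · have h1 : stepA context (false, out, []) c = (false, out ++ [c], []) := by
          simp [stepA, hc]
        rw [List.foldl_cons, h1, (ih.1 (out ++ [c]))]
        simp only [mySplit, if_neg hc]
        obtain ⟨h, tl, e⟩ : ∃ h tl, mySplit t [] = h :: tl := by
          cases e : mySplit t [] with
          | nil => exact absurd e (mySplit_ne_nil t [])
          | cons h tl => exact ⟨h, tl, rfl⟩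
        have habs : mySplit t [c] = (c :: h) :: tl := by
          have := mySplit_cur t [c]
          simpa [e] using this
        rw [habs, e, chunks_cons, chunks_cons]
        simp
    · intro out cur
      by_cases hc : c = '%'
      · subst hc
        have hvar : ('%' :: cur.reverse) ++ ['%'] = '%' :: (cur.reverse ++ ['%']) := by simp
        have h1 : stepA context (true, out, '%' :: cur.reverse) '%'
            = (false, out ++ trVar context cur.reverse, []) := by
          simp only [stepA, beq_self_eq_true, Bool.not_true, Bool.false_eq_true, if_false,
            if_true, hvar]
          rw [slice_var]
          unfold trVar
          split_ifs with hA hB <;> simp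
        rw [List.foldl_cons, h1, ih.1 (out ++ trVar context cur.reverse)]
        simp only [mySplit, if_pos]
        obtain ⟨h, tl, e⟩ : ∃ h tl, mySplit t [] = h :: tl := by
          cases e : mySplit t [] with
          | nil => exact absurd e (mySplit_ne_nil t [])
          | cons h tl => exact ⟨h, tl, rfl⟩
        rw [e]
        simp [chunksV]
      · have h1 : stepA context (true, out, '%' :: cur.reverse) c
            = (true, out, '%' :: (c :: cur).reverse) := by
          simp [stepA, hc]
        rw [List.foldl_cons, h1, ih.2 out (c :: cur)]
        simp [mySplit, hc]

lemma join_nil_flatten (l : List (List Char)) : PySem.Chars.join [] l = l.flatten := by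
  induction l with
  | nil => simp [PySem.Chars.join_nil]
  | cons p rest ih =>
    cases rest with
    | nil => simp [PySem.Chars.join_singleton]
    | cons q tl => rw [PySem.Chars.join_cons_cons, ih]; simp

lemma fmod_two_even (k : Nat) : PySem.Int.mod (2 * (k : Int)) 2 = 0 := by
  simp [PySem.Int.mod, Int.fmod_eq_emod]

lemma fmod_two_odd (k : Nat) : PySem.Int.mod (2 * (k : Int) + 1) 2 = 1 := by
  simp [PySem.Int.mod, Int.fmod_eq_emod]

lemma enum_nil {α : Type} (i : Int) : PySem.List.enumerate ([] : List α) i = [] := by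
  simp [PySem.List.enumerate]

lemma enum_cons {α : Type} (x : α) (t : List α) (i : Int) :
    PySem.List.enumerate (x :: t) i = (i, x) :: PySem.List.enumerate t (i + 1) := by
  simp [PySem.List.enumerate]

lemma stepB_even (context : List (String × String)) (last : Int) (acc : List (List Char))
    (k : Nat) (p : List Char) : stepB context last acc (2 * (k : Int), p) = acc ++ [p] := by
  simp [stepB, fmod_two_even k]

lemma stepB_odd_lt (context : List (String × String)) (last : Int) (acc : List (List Char))
    (k : Nat) (v : List Char) (h : 2 * (k : Int) + 1 < last) :
    stepB context last acc (2 * (k : Int) + 1, v) = acc ++ [trVar context v] := by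
  simp only [stepB, fmod_two_odd k, h, if_true, trVar]
  norm_num
  split_ifs <;> simp

lemma stepB_odd_ge (context : List (String × String)) (last : Int) (acc : List (List Char))
    (k : Nat) (v : List Char) (h : ¬ (2 * (k : Int) + 1 < last)) :
    stepB context last acc (2 * (k : Int) + 1, v) = acc := by
  simp [stepB, h]

-- B's enumerated pass produces the same chunks
lemma B_fold (context : List (String × String)) : ∀ (parts : List (List Char)) (k : Nat)
    (acc : List (List Char)),
    (PySem.List.enumerate parts (2 * (k : Int))).foldl
        (stepB context (2 * (k : Int) + parts.length - 1)) acc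
      = acc ++ chunks context parts := by
  intro parts
  induction parts using chunks.induct with
  | case1 => intro k acc; rw [enum_nil]; simp [chunks]
  | case2 p =>
    intro k acc
    rw [enum_cons]
    simp only [List.foldl_cons]
    rw [stepB_even]
    simp [chunks]
  | case3 p v =>
    intro k acc
    rw [enum_cons, enum_cons]
    simp only [List.foldl_cons]
    rw [stepB_even, stepB_odd_ge _ _ _ _ _
      (by simp only [List.length_cons, List.length_nil]; push_cast; omega)]
    simp [chunks]
  | case4 p v rest hne ih =>
    intro k acc
    obtain ⟨r0, rs0, rfl⟩ : ∃ a b, rest = a :: b := by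
      cases rest with
      | nil => exact absurd rfl hne
      | cons a b => exact ⟨a, b, rfl⟩
    rw [enum_cons, enum_cons]
    simp only [List.foldl_cons]
    rw [stepB_even, stepB_odd_lt _ _ _ _ _
      (by simp only [List.length_cons]; push_cast; omega)]
    have hshift : (2 * (k : Int) + 1 + 1) = 2 * ((k + 1 : Nat) : Int) := by push_cast; ring
    have hlast : 2 * (k : Int) + ((p :: v :: r0 :: rs0 : List (List Char)).length : Int) - 1
        = 2 * ((k + 1 : Nat) : Int) + ((r0 :: rs0 : List (List Char)).length : Int) - 1 := by
      simp only [List.length_cons]; push_cast; ring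
    rw [hshift, hlast, ih (k + 1) (acc ++ [p] ++ [trVar context v])]
    simp [chunks]

-- ===== VERDICT (by name: the statement is the Claim_ definition above) =====
theorem translate_special_syntax_spec : Claim_equal_translate_special_syntax := by
  intro target_string context _
  unfold Spec_translate_special_syntax translate_special_syntax translate_special_syntax_alt
  rw [splitOn_eq_mySplit]
  have hA := (A_run context target_string.toList).1 []
  have hB := B_fold context (mySplit target_string.toList []) 0 []
  simp only [Nat.cast_zero, mul_zero, zero_add] at hB
  dsimp only
  rw [hA, hB, join_nil_flatten]
  simp
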